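-- pv_equiv track=rewrite | github.com/KYUSEONGHAN/Development | 하루에 한개씩 문제 풀기/Python/BOJ/집합과 맵/14425.py | solve
-- ===== SOURCE A (Python) =====
-- def solve(s: list, data_m: list) -> int:
--     result = 0
--
--     for x in s:
--         if x in data_m:
--             for y in data_m:
--                 if x == y:
--                     result += 1
--
--     return result
-- ===== SOURCE B (Python) =====
-- def solve(s: list, data_m: list) -> int:
--     # Frequency tables of both inputs; answer is the multiset inner product.
--     cm = {}
--     for y in data_m:
--         cm[y] = cm.get(y, 0) + 1
--     cs = {}
--     for x in s:
--         cs[x] = cs.get(x, 0) + 1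
--     return sum(c * cm.get(v, 0) for v, c in cs.items())
-- ===== Notes on version B (the rewrite author's own statement) =====
-- stated objective: faster
-- what changed: Replaces A's nested scan (membership test plus a full inner pass over data_m for every element of s) with two hash frequency tables built in one pass each, returning the multiset inner product sum cs[v]*cm[v] over distinct keys of s.
import Mathlib
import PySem

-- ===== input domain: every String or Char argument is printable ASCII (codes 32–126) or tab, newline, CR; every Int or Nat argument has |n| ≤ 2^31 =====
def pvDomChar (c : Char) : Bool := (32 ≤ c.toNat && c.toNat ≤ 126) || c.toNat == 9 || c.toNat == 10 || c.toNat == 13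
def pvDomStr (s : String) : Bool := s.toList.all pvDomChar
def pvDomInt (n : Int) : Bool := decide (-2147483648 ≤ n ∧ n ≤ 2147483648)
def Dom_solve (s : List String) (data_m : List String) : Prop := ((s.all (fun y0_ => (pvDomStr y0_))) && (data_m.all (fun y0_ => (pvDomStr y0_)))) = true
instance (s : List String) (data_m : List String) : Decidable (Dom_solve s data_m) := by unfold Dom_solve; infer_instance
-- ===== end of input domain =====

-- B replaces A's nested scan by two one-pass frequency tables and their inner product (asymptotically faster).

-- ===== PORT A =====
-- for x in s: if x in data_m: for y in data_m: if x == y: result += 1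
def solve (s : List String) (data_m : List String) : Int :=
  s.foldl (fun result x =>
    if x ∈ data_m then
      data_m.foldl (fun r y => if x == y then r + 1 else r) result
    else result) 0

-- ===== PORT B =====
-- cm = counter of data_m; cs = counter of s; sum of c * cm.get(v, 0) over (v, c) in cs.items()
def solve_alt (s : List String) (data_m : List String) : Int :=
  let cm := data_m.foldl (fun d y => d.insert y (d.getD y 0 + 1)) PySem.Dict.empty
  let cs := s.foldl (fun d x => d.insert x (d.getD x 0 + 1)) PySem.Dict.empty
  (cs.items.map (fun p => p.2 * cm.getD p.1 0)).sum

-- ===== PRECONDITION & SPEC =====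
def Spec_solve (s : List String) (data_m : List String) (out : Int) : Prop := out = solve_alt s data_m
instance (s : List String) (data_m : List String) (out : Int) : Decidable (Spec_solve s data_m out) := by unfold Spec_solve; infer_instance

-- ===== CLAIM (what is proved, stated in full; the proofs are below) =====
def Claim_equal_solve : Prop := ∀ (s : List String) (data_m : List String), Dom_solve s data_m → Spec_solve s data_m (solve s data_m)

-- ===== LEMMAS AND PROOFS =====

-- A's inner loop adds the number of occurrences of x in data_m
theorem solve_inner (x : String) (data_m : List String) (r : Int) :
    data_m.foldl (fun r y => if x == y then r + 1 else r) r = r + data_m.count x := by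
  induction data_m generalizing r with
  | nil => simp
  | cons y t ih =>
      simp only [List.foldl_cons, List.count_cons, ih]
      by_cases h : x = y
      · simp [h]
        ring
      · have h1 : (x == y) = false := by simp [h]
        have h2 : (y == x) = false := by simp [Ne.symm h]
        simp [h1, h2]

-- A computes the sum over s of counts in data_m
theorem solve_eq_sum (s : List String) (data_m : List String) :
    solve s data_m = (s.map (fun x => (data_m.count x : Int))).sum := by
  unfold solve
  induction s using List.reverseRecOn with
  | nil => simp
  | append_singleton t x ih =>
      rw [List.foldl_append, List.map_append, List.sum_append, ← ih]
      simp only [List.foldl_cons, List.foldl_nil, List.map_cons, List.map_nil, List.sum_cons,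
        List.sum_nil, add_zero]
      by_cases h : x ∈ data_m
      · rw [if_pos h, solve_inner]
      · rw [if_neg h, List.count_eq_zero_of_not_mem h]
        simp

-- B computes the inner product of the two counters
theorem solve_alt_eq_sum (s : List String) (data_m : List String) :
    solve_alt s data_m = (s.map (fun x => (data_m.count x : Int))).sum := by
  unfold solve_alt
  rw [PySem.Dict.foldl_insert_getD_add_one_eq_counter,
      PySem.Dict.foldl_insert_getD_add_one_eq_counter]
  show ((PySem.Dict.counter s).items.map
      (fun p => p.2 * (PySem.Dict.counter data_m).getD p.1 0)).sum = _
  rw [PySem.Dict.items_counter]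
  have hmap : ((PySem.Set.ofList s).map (fun k => (k, (s.count k : Int)))).map
        (fun p => p.2 * (PySem.Dict.counter data_m).getD p.1 0)
      = (PySem.Set.ofList s).map (fun k => (s.count k : Int) * (data_m.count k : Int)) := by
    rw [List.map_map]
    refine List.map_congr_left (fun k _ => ?_)
    simp [PySem.Dict.getD_counter]
  rw [hmap]
  have hfin : ((PySem.Set.ofList s) : List String).toFinset = s.toFinset := by
    ext a
    simp [List.mem_toFinset, PySem.Set.mem_ofList]
  have hnodup : ((PySem.Set.ofList s) : List String).Nodup := PySem.Set.nodup_ofList s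
  rw [← List.sum_toFinset _ hnodup, hfin, Finset.sum_list_map_count]
  refine Finset.sum_congr rfl (fun m _ => ?_)
  simp

-- ===== VERDICT (by name: the statement is the Claim_ definition above) =====
theorem solve_spec : Claim_equal_solve := by
  intro s data_m _
  unfold Spec_solve
  rw [solve_eq_sum, solve_alt_eq_sum]
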